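-- pv_equiv track=rewrite | github.com/chae1park/codingtest | etc/광물_캐기.py | mining
-- ===== SOURCE A (Python) =====
-- def mining(status, mine_type):
--     # 광물 캐고, 피로도 계산하는 함수
--
--     # status: 이번 세트에서 캐야할 광물 현황
--     # mine_type: 해당 세트를 캘 곡괭이 (고정)
--
--     ans = 0 # 피로도
--     cnt = 5 # 남은 광물 수
--     mineral_type = 0 # 광물 종류 인덱스
--
--     # 광물 다 캐거나 곡괭이가 없을때까지
--     while (cnt > 0) and (mineral_type <= 2):
--         while status[mineral_type] != 0: # 해당 자리에 있는 캘 광물이 남아있을 때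
--             if mine_type == mineral_type: # 동급의 곡괭이와 광물이면 공통적으로 1 소모
--                 # 광물 캠
--                 status[mineral_type] -= 1
--                 ans += 1
--                 cnt -= 1
--             elif mine_type == mineral_type + 1: # iron == dia+1 (한단계 차이면 5 소모)
--                 # 광물 캠
--                 status[mineral_type] -= 1
--                 ans += 5
--                 cnt -= 1
--
--             elif mine_type == mineral_type + 2: # rock == dia+2 (두단계 차이면 25 소모)
--                 # 광물 캠
--                 status[mineral_type] -= 1
--                 ans += 25
--                 cnt -= 1
--             else: # dia mine --> rock (상위 곡괭이로 하위 곡괭이를 캐면 전부 1 소모)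
--                 # 광물 캠
--                 status[mineral_type] -= 1
--                 ans += 1
--                 cnt -= 1
--         # 해당 자리의 광물을 다 캤으면 다음 광물 종류로 넘어감
--         mineral_type += 1
--
--     # 피로도 반환
--     return ans
-- ===== SOURCE B (Python) =====
-- def mining(status, mine_type):
--     # Drain each mineral type in one arithmetic step instead of one loop
--     # iteration per mineral. Same in-place mutation as A: processed slots -> 0.
--     ans = 0
--     cnt = 5
--     for t in range(3):
--         if cnt <= 0:
--             break
--         c = status[t]
--         diff = mine_type - t
--         cost = 25 if diff == 2 else (5 if diff == 1 else 1)
--         ans += c * cost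
--         cnt -= c
--         status[t] = 0
--     return ans
-- ===== Notes on version B (the rewrite author's own statement) =====
-- stated objective: faster
-- what changed: replaces A's per-mineral inner while loop with one multiplication (c * cost) per mineral type, draining each slot in O(1)
import Mathlib
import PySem

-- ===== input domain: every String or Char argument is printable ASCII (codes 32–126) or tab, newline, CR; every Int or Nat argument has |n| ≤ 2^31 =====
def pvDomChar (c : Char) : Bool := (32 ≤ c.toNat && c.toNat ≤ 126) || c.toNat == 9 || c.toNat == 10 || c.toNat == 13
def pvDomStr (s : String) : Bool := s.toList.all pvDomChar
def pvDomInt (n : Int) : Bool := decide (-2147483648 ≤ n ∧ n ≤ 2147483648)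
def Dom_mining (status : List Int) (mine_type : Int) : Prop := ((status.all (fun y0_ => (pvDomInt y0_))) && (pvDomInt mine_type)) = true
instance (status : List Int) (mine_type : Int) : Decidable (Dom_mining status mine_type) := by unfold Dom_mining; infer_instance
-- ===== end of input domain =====

-- B drains each mineral type with one multiplication instead of A's per-mineral inner loop.
-- Both Pythons mutate `status` in place the same way; the equivalence proved here is about the return value.

-- ===== PORT A =====
-- inner 'while status[mineral_type] != 0' loop of A; exact for 0 ≤ v (Python diverges
-- for v < 0 — those inputs are excluded by Pre_mining, so the v ≤ 0 stop is never relied on there)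
def miningInner (mine_type mineral_type v ans cnt : Int) : Int × Int :=
  if v ≤ 0 then (ans, cnt)
  else if mine_type = mineral_type then
    miningInner mine_type mineral_type (v - 1) (ans + 1) (cnt - 1)
  else if mine_type = mineral_type + 1 then
    miningInner mine_type mineral_type (v - 1) (ans + 5) (cnt - 1)
  else if mine_type = mineral_type + 2 then
    miningInner mine_type mineral_type (v - 1) (ans + 25) (cnt - 1)
  else
    miningInner mine_type mineral_type (v - 1) (ans + 1) (cnt - 1)
termination_by v.toNat
decreasing_by all_goals omega

-- outer 'while (cnt > 0) and (mineral_type <= 2)' loop of A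
def miningOuter (status : List Int) (mine_type : Int) (mineral_type : Nat) (cnt ans : Int) : Int :=
  if cnt > 0 ∧ mineral_type ≤ 2 then
    match PySem.List.pyGet? status (mineral_type : Int) with
    | none => ans   -- IndexError (excluded by Pre_mining)
    | some v =>
      let p := miningInner mine_type (mineral_type : Int) v ans cnt
      miningOuter status mine_type (mineral_type + 1) p.2 p.1
  else ans
termination_by 3 - mineral_type

def mining (status : List Int) (mine_type : Int) : Int :=
  miningOuter status mine_type 0 5 0

-- ===== PORT B =====
def altCost (mine_type : Int) (t : Int) : Int :=
  let diff := mine_type - t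
  if diff = 2 then 25 else if diff = 1 then 5 else 1

-- 'for t in range(3)' with an early break when cnt <= 0
def altLoop (status : List Int) (mine_type : Int) (t : Nat) (cnt ans : Int) : Int :=
  if t < 3 then
    if cnt ≤ 0 then ans
    else
      match PySem.List.pyGet? status (t : Int) with
      | none => ans   -- IndexError (excluded by Pre_mining)
      | some c => altLoop status mine_type (t + 1) (cnt - c) (ans + c * altCost mine_type (t : Int))
  else ans
termination_by 3 - t

def mining_alt (status : List Int) (mine_type : Int) : Int :=
  altLoop status mine_type 0 5 0

-- ===== PRECONDITION & SPEC =====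
-- slot i exists and is nonnegative
def okSlot (status : List Int) (i : Nat) : Bool :=
  match PySem.List.pyGet? status (i : Int) with
  | some v => decide (0 ≤ v)
  | none => false

def gSlot (status : List Int) (i : Nat) : Int :=
  (PySem.List.pyGet? status (i : Int)).getD 0

-- Pre_ admits exactly the inputs on which A returns: A raises IndexError when it reaches a
-- missing slot with cnt > 0, and diverges on a reached negative slot; a slot i is reached
-- unless an earlier prefix already supplied 5 minerals.
def Pre_mining (status : List Int) (mine_type : Int) : Prop :=
  okSlot status 0 = true ∧
  (okSlot status 1 = true ∨ 5 ≤ gSlot status 0) ∧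
  (okSlot status 2 = true ∨ 5 ≤ gSlot status 0 ∨ 5 ≤ gSlot status 0 + gSlot status 1)
instance (status : List Int) (mine_type : Int) : Decidable (Pre_mining status mine_type) := by
  unfold Pre_mining; infer_instance

def pvWitness_mining : List Int × Int := ([2, 3, 1], 2)

def Spec_mining (status : List Int) (mine_type : Int) (out : Int) : Prop := out = mining_alt status mine_type
instance (status : List Int) (mine_type : Int) (out : Int) : Decidable (Spec_mining status mine_type out) := by unfold Spec_mining; infer_instance

-- ===== CLAIM (what is proved, stated in full; the proofs are below) =====
def Claim_equal_mining : Prop := ∀ (status : List Int) (mine_type : Int), Dom_mining status mine_type → Pre_mining status mine_type → Spec_mining status mine_type (mining status mine_type)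

-- ===== LEMMAS AND PROOFS =====

-- A's inner loop over one slot equals B's single multiplication
lemma miningInner_eq (mt t v ans cnt : Int) (hv : 0 ≤ v) :
    miningInner mt t v ans cnt = (ans + v * altCost mt t, cnt - v) := by
  obtain ⟨n, rfl⟩ : ∃ n : Nat, v = (n : Int) := ⟨v.toNat, by omega⟩
  induction n generalizing ans cnt with
  | zero => simp [miningInner, altCost]
  | succ k ih =>
    rw [miningInner]
    have hk0 : (0 : Int) ≤ (k : Int) := by omega
    have hns : ¬ (((k + 1 : Nat) : Int) ≤ 0) := by omega
    have hk : ((k + 1 : Nat) : Int) - 1 = (k : Int) := by push_cast; ring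
    rw [if_neg hns]
    by_cases h0 : mt = t
    · rw [if_pos h0, hk, ih (ans + 1) (cnt - 1) hk0]
      have hc : altCost mt t = 1 := by
        have : mt - t = 0 := by omega
        simp [altCost, this]
      rw [hc, Prod.mk.injEq]
      constructor <;> push_cast <;> ring
    · rw [if_neg h0]
      by_cases h1 : mt = t + 1
      · rw [if_pos h1, hk, ih (ans + 5) (cnt - 1) hk0]
        have hc : altCost mt t = 5 := by
          have : mt - t = 1 := by omega
          simp [altCost, this]
        rw [hc, Prod.mk.injEq]
        constructor <;> push_cast <;> ring
      · rw [if_neg h1]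
        by_cases h2 : mt = t + 2
        · rw [if_pos h2, hk, ih (ans + 25) (cnt - 1) hk0]
          have hc : altCost mt t = 25 := by
            have : mt - t = 2 := by omega
            simp [altCost, this]
          rw [hc, Prod.mk.injEq]
          constructor <;> push_cast <;> ring
        · rw [if_neg h2, hk, ih (ans + 1) (cnt - 1) hk0]
          have hc : altCost mt t = 1 := by
            have hd1 : mt - t ≠ 1 := by omega
            have hd2 : mt - t ≠ 2 := by omega
            simp [altCost, if_neg hd1, if_neg hd2]
          rw [hc, Prod.mk.injEq]
          constructor <;> push_cast <;> ring

lemma okSlot_some (status : List Int) (i : Nat) (h : okSlot status i = true) :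
    ∃ v, PySem.List.pyGet? status (i : Int) = some v ∧ 0 ≤ v ∧ gSlot status i = v := by
  unfold okSlot at h
  cases hg : PySem.List.pyGet? status (i : Int) with
  | none => rw [hg] at h; exact absurd h (by simp)
  | some v => rw [hg] at h; exact ⟨v, rfl, by simpa using h, by simp [gSlot, hg]⟩

-- ===== VERDICT (by name: the statement is the Claim_ definition above) =====
theorem mining_spec : Claim_equal_mining := by
  intro status mt _ hpre
  obtain ⟨h0, h1, h2⟩ := hpre
  obtain ⟨v0, hg0, hv0, he0⟩ := okSlot_some status 0 h0
  unfold Spec_mining mining mining_alt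
  -- step t = 0
  rw [miningOuter, altLoop]
  simp only [Nat.cast_zero] at hg0 ⊢
  rw [hg0]; dsimp only
  rw [if_pos (by norm_num : (5:Int) > 0 ∧ (0:Nat) ≤ 2),
      if_pos (by norm_num : (0:Nat) < 3), if_neg (by norm_num : ¬ ((5:Int) ≤ 0))]
  rw [miningInner_eq mt 0 v0 0 5 hv0]
  -- step t = 1
  by_cases hc1 : (5 : Int) - v0 > 0
  · have hok1 : okSlot status 1 = true := by
      rcases h1 with h | h
      · exact h
      · rw [he0] at h; omega
    obtain ⟨v1, hg1, hv1, he1⟩ := okSlot_some status 1 hok1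
    rw [miningOuter, altLoop]
    simp only [Nat.reduceAdd, Nat.cast_one] at hg1 ⊢
    rw [hg1]; dsimp only
    rw [if_pos (⟨hc1, by norm_num⟩ : (5:Int) - v0 > 0 ∧ (1:Nat) ≤ 2),
        if_pos (by norm_num : (1:Nat) < 3), if_neg (by omega : ¬ ((5:Int) - v0 ≤ 0))]
    rw [miningInner_eq mt 1 v1 (0 + v0 * altCost mt 0) (5 - v0) hv1]
    -- step t = 2
    by_cases hc2 : (5 : Int) - v0 - v1 > 0
    · have hok2 : okSlot status 2 = true := by
        rcases h2 with h | h | h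
        · exact h
        · rw [he0] at h; omega
        · rw [he0, he1] at h; omega
      obtain ⟨v2, hg2, hv2, _⟩ := okSlot_some status 2 hok2
      rw [miningOuter, altLoop]
      simp only [Nat.reduceAdd, Nat.cast_ofNat] at hg2 ⊢
      rw [hg2]; dsimp only
      rw [if_pos (⟨hc2, by norm_num⟩ : (5:Int) - v0 - v1 > 0 ∧ (2:Nat) ≤ 2),
          if_pos (by norm_num : (2:Nat) < 3), if_neg (by omega : ¬ ((5:Int) - v0 - v1 ≤ 0))]
      rw [miningInner_eq mt 2 v2 (0 + v0 * altCost mt 0 + v1 * altCost mt 1) (5 - v0 - v1) hv2]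
      -- step t = 3: both loops exit
      rw [miningOuter, altLoop]
      norm_num
    · rw [miningOuter, altLoop]
      rw [if_neg (by omega : ¬ ((5:Int) - v0 - v1 > 0 ∧ (2:Nat) ≤ 2)),
          if_pos (by norm_num : (2:Nat) < 3), if_pos (by omega : (5:Int) - v0 - v1 ≤ 0)]
  · rw [miningOuter, altLoop]
    rw [if_neg (by omega : ¬ ((5:Int) - v0 > 0 ∧ (1:Nat) ≤ 2)),
        if_pos (by norm_num : (1:Nat) < 3), if_pos (by omega : (5:Int) - v0 ≤ 0)]
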